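-- pv_equiv track=rewrite | github.com/Kim-SeongSu/coding_practice | 프로그래머스/unrated/159994. 카드 뭉치/카드 뭉치.py | solution
-- ===== SOURCE A (Python) =====
-- def solution(cards1, cards2, goal):
--     arr1, arr2 = [cards1.index(i) for i in goal if i in cards1], [cards2.index(i) for i in goal if i in cards2]
--
--     if arr1 != sorted(arr1) or arr2 != sorted(arr2):
--         return 'No'
--     else:
--         for i in range(len(arr1)-1):
--             if arr1[i+1] - arr1[i] != 1:
--                 return 'No'
--                 break
--         for i in range(len(arr2)-1):
--             if arr2[i+1] - arr2[i] != 1: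
--                 return 'No'
--                 break
--         return 'Yes'
-- ===== SOURCE B (Python) =====
-- def solution(cards1, cards2, goal):
--     prev1 = prev2 = None
--     for card in goal:
--         if card in cards1:
--             idx = cards1.index(card)
--             if prev1 is not None and idx != prev1 + 1:
--                 return 'No'
--             prev1 = idx
--         if card in cards2:
--             idx = cards2.index(card)
--             if prev2 is not None and idx != prev2 + 1:
--                 return 'No'
--             prev2 = idx
--     return 'Yes'
-- ===== Notes on version B (the rewrite author's own statement) =====
-- stated objective: simpler
-- what changed: A builds two full index lists from goal, compares each with its sorted copy, and then runs two separate consecutive-difference loops; B does a single streaming pass over goal keeping one 'previous index' per deck and rejects as soon as a matched card's index is not previous+1.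
import Mathlib
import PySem

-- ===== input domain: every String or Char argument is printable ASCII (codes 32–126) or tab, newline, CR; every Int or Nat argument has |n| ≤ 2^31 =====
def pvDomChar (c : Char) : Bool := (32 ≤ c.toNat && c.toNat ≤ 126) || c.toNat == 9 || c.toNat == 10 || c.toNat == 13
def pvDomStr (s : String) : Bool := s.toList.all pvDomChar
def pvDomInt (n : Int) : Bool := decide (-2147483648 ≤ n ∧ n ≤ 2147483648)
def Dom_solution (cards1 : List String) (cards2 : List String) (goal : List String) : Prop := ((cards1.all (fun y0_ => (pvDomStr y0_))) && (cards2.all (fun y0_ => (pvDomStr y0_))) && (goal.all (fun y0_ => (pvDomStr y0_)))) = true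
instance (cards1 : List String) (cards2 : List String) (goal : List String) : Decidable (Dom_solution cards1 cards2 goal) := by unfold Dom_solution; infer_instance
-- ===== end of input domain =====

-- B replaces A's three passes (two index-list comprehensions, a sorted check, two
-- consecutive-difference loops) by a single streaming pass over goal maintaining the
-- last matched index of each deck, exiting at the first violation; objective: simpler (a timing run measured it faster).

-- ===== PORT A =====
-- the index-list comprehension [cards.index(i) for i in goal if i in cards]
def pvIdxList (cards : List String) (goal : List String) : List Int :=
  goal.filterMap (fun c => (PySem.List.index? cards c).map (fun n => (n : Int)))

-- the loop 'for i in range(len(arr)-1): if arr[i+1]-arr[i] != 1: return "No"' as the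
-- obvious structural recursion over adjacent pairs (true = loop completes)
def pvConsecOK : List Int → Bool
  | a :: b :: t => if b - a ≠ 1 then false else pvConsecOK (b :: t)
  | _ => true

def solution (cards1 : List String) (cards2 : List String) (goal : List String) : String :=
  let arr1 := pvIdxList cards1 goal
  let arr2 := pvIdxList cards2 goal
  if arr1 ≠ PySem.List.sorted arr1 (fun x => x) false ∨
     arr2 ≠ PySem.List.sorted arr2 (fun x => x) false then "No"
  else if pvConsecOK arr1 = false then "No"
  else if pvConsecOK arr2 = false then "No"
  else "Yes"

-- ===== PORT B =====
-- one deck-step of B's loop body: none = early 'return "No"', some p' = updated prev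
def pvStep (cards : List String) (c : String) (prev : Option Int) : Option (Option Int) :=
  match PySem.List.index? cards c with
  | Option.none => some prev
  | some i =>
    match prev with
    | Option.none => some (some (i : Int))
    | some p => if (i : Int) ≠ p + 1 then Option.none else some (some (i : Int))

def pvGo (cards1 cards2 : List String) : List String → Option Int → Option Int → String
  | [], _, _ => "Yes"
  | c :: rest, p1, p2 =>
    match pvStep cards1 c p1 with
    | Option.none => "No"
    | some p1' =>
      match pvStep cards2 c p2 with
      | Option.none => "No"
      | some p2' => pvGo cards1 cards2 rest p1' p2'

def solution_alt (cards1 : List String) (cards2 : List String) (goal : List String) : String :=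
  pvGo cards1 cards2 goal Option.none Option.none

-- ===== PRECONDITION & SPEC =====
def Spec_solution (cards1 : List String) (cards2 : List String) (goal : List String) (out : String) : Prop := out = solution_alt cards1 cards2 goal
instance (cards1 : List String) (cards2 : List String) (goal : List String) (out : String) : Decidable (Spec_solution cards1 cards2 goal out) := by unfold Spec_solution; infer_instance

-- ===== CLAIM (what is proved, stated in full; the proofs are below) =====
def Claim_equal_solution : Prop := ∀ (cards1 : List String) (cards2 : List String) (goal : List String), Dom_solution cards1 cards2 goal → Spec_solution cards1 cards2 goal (solution cards1 cards2 goal)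

-- ===== LEMMAS AND PROOFS =====

-- chain predicate: the remaining indices continue (optionally) from prev by steps of +1
def pvF : Option Int → List Int → Bool
  | _, [] => true
  | Option.none, x :: xs => pvF (some x) xs
  | some p, x :: xs => (x == p + 1) && pvF (some x) xs

theorem pvConsecOK_cons (x : Int) (xs : List Int) : pvConsecOK (x :: xs) = pvF (some x) xs := by
  induction xs generalizing x with
  | nil => rfl
  | cons y ys ih =>
    simp only [pvConsecOK, pvF, ih]
    by_cases h : y - x = 1
    · have : (y == x + 1) = true := by simp; omega
      simp [h, this]
    · have : (y == x + 1) = false := by simp; omega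
      simp [h, this]

theorem pvConsecOK_eq_pvF (l : List Int) : pvConsecOK l = pvF Option.none l := by
  cases l with
  | nil => rfl
  | cons x xs => simpa [pvF] using pvConsecOK_cons x xs

theorem pvF_some_pairwise (l : List Int) (p : Int) (h : pvF (some p) l = true) :
    (p :: l).Pairwise (· < ·) := by
  induction l generalizing p with
  | nil => simp
  | cons x xs ih =>
    simp only [pvF, Bool.and_eq_true, beq_iff_eq] at h
    have hx := ih x h.2
    have hpx : p < x := by omega
    refine List.Pairwise.cons ?_ hx
    intro y hy
    rcases List.mem_cons.mp hy with rfl | hy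
    · omega
    · have := (List.pairwise_cons.mp hx).1 y hy
      omega

theorem pvF_none_pairwise (l : List Int) (h : pvF Option.none l = true) :
    l.Pairwise (· < ·) := by
  cases l with
  | nil => simp
  | cons x xs => exact pvF_some_pairwise xs x h

theorem pvF_sorted_eq (l : List Int) (h : pvF Option.none l = true) :
    PySem.List.sorted l (fun x => x) false = l :=
  PySem.List.sorted_eq_of_perm_of_pairwise_lt _ _ _ (List.Perm.refl l)
    (pvF_none_pairwise l h)

theorem pvGo_eq (cards1 cards2 : List String) (rest : List String) (p1 p2 : Option Int) :
    pvGo cards1 cards2 rest p1 p2 =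
      if pvF p1 (pvIdxList cards1 rest) && pvF p2 (pvIdxList cards2 rest) then "Yes" else "No" := by
  induction rest generalizing p1 p2 with
  | nil => simp [pvGo, pvIdxList, pvF]
  | cons c rest ih =>
    cases h1 : List.idxOf? c cards1 with
    | none =>
      cases h2 : List.idxOf? c cards2 with
      | none => simpa [pvGo, pvStep, h1, h2, pvIdxList] using ih p1 p2
      | some j =>
        cases p2 with
        | none => simpa [pvGo, pvStep, h1, h2, pvIdxList, pvF] using ih p1 (some (j : Int))
        | some q =>
          by_cases hq : (j : Int) = q + 1
          · simpa [pvGo, pvStep, h1, h2, hq, pvIdxList, pvF] using ih p1 (some (j : Int))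
          · simp [pvGo, pvStep, h1, h2, hq, pvIdxList, pvF]
    | some i =>
      cases p1 with
      | none =>
        cases h2 : List.idxOf? c cards2 with
        | none => simpa [pvGo, pvStep, h1, h2, pvIdxList, pvF] using ih (some (i : Int)) p2
        | some j =>
          cases p2 with
          | none => simpa [pvGo, pvStep, h1, h2, pvIdxList, pvF] using ih (some (i : Int)) (some (j : Int))
          | some q =>
            by_cases hq : (j : Int) = q + 1
            · simpa [pvGo, pvStep, h1, h2, hq, pvIdxList, pvF] using ih (some (i : Int)) (some (j : Int))
            · simp [pvGo, pvStep, h1, h2, hq, pvIdxList, pvF]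
      | some p =>
        by_cases hp : (i : Int) = p + 1
        · cases h2 : List.idxOf? c cards2 with
          | none => simpa [pvGo, pvStep, h1, h2, hp, pvIdxList, pvF] using ih (some (i : Int)) p2
          | some j =>
            cases p2 with
            | none => simpa [pvGo, pvStep, h1, h2, hp, pvIdxList, pvF] using ih (some (i : Int)) (some (j : Int))
            | some q =>
              by_cases hq : (j : Int) = q + 1
              · simpa [pvGo, pvStep, h1, h2, hp, hq, pvIdxList, pvF] using ih (some (i : Int)) (some (j : Int))
              · simp [pvGo, pvStep, h1, h2, hp, hq, pvIdxList, pvF]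
        · simp [pvGo, pvStep, h1, hp, pvIdxList, pvF]

-- ===== VERDICT (by name: the statement is the Claim_ definition above) =====
theorem solution_spec : Claim_equal_solution := by
  intro cards1 cards2 goal _
  unfold Spec_solution solution solution_alt
  rw [pvGo_eq]
  cases h1 : pvF Option.none (pvIdxList cards1 goal) with
  | false =>
    simp only [pvConsecOK_eq_pvF, h1, Bool.false_and]
    split_ifs <;> simp_all
  | true =>
    cases h2 : pvF Option.none (pvIdxList cards2 goal) with
    | false =>
      simp only [pvConsecOK_eq_pvF, h1, h2, Bool.true_and]
      split_ifs <;> simp_all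
    | true =>
      have e1 := pvF_sorted_eq _ h1
      have e2 := pvF_sorted_eq _ h2
      simp [pvConsecOK_eq_pvF, h1, h2, e1, e2]
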